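-- pv_equiv track=rewrite | github.com/pypi-data/pypi-mirror-60 | packages/mhelper/mhelper-1.0.1.75.tar.gz/mhelper-1.0.1.75/mhelper/string_helper.py | strip_lines_to_first
-- ===== SOURCE A (Python) =====
-- def strip_lines_to_first( text: str ) -> str:
--     """
--     Strips leading spaces from each line to match the indent of the first line.
--
--     Leading blank lines are removed.
--     Any trailing lines or spaces are removed.
--     """
--     if not text:
--         return ""
--
--     lines = text.split( "\n" )
--
--     first_non_blank = None
--
--     for i, line in enumerate( lines ):
--         if line.lstrip():
--             first_non_blank = i
--             break
--
--     if first_non_blank is None: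
--         return ""
--
--     lines = lines[first_non_blank:]
--     first_indent = len( lines[0] ) - len( lines[0].lstrip() )
--
--     if first_indent:
--         lines = [remove_indent( first_indent, line ) for line in lines]
--
--     return "\n".join( lines ).rstrip()
--
-- def remove_indent( current_indent, line: str ):
--     i = 0
--
--     for i, x in enumerate( line ):
--         if x != " ":
--             break
--
--     i = min( i, current_indent )
--
--     return line[i:]
-- ===== SOURCE B (Python) =====
-- def strip_lines_to_first(text: str) -> str:
--     # Single forward pass with an accumulator state machine: the indent k is
--     # discovered on the fly, trailing-blank removal is done incrementally via a
--     # kept/run buffer pair, and dedenting works by prefix comparison -- no list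
--     # slicing, no per-line character loop, no global join().rstrip().
--     k = None
--     kept = []   # dedented lines up to and including the last line with content
--     run = []    # dedented whitespace-only lines seen since then
--     for line in text.split("\n"):
--         if k is None:
--             if not line.strip():
--                 continue   # drop leading blank lines
--             k = len(line) - len(line.lstrip())
--         d = line[k:] if line[:k] == " " * k else line.lstrip(" ")
--         if d.strip():
--             kept += run + [d]
--             run = []
--         else:
--             run.append(d)
--     if not kept:
--         return ""
--     kept[-1] = kept[-1].rstrip()
--     return "\n".join(kept)
-- ===== Notes on version B (the rewrite author's own statement) =====
-- stated objective: alternative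
-- what changed: B replaces A's staged passes (find first non-blank index, slice the list, map a per-line character-loop helper, join, global rstrip) by one forward fold with an accumulator state machine: the indent is discovered on the fly, dedenting is a prefix comparison (line[:k] == ' '*k) instead of a character loop, and trailing-blank removal is done incrementally with a kept/run buffer pair plus a final rstrip of only the last kept line.
-- intended difference: On texts where, after the first non-blank line (with indent k >= 1), some line consists entirely of spaces, has length <= k, and is followed by a later line with non-whitespace content, A leaves at least one space on that line (remove_indent's loop index stops at len-1 when no non-space is found) while B strips all of its spaces leaving it empty, which is the intended dedent behaviour. — e.g. on strip_lines_to_first(" a\n \nb"): A returns "a\n \nb", B returns "a\n\nb"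
import Mathlib
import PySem

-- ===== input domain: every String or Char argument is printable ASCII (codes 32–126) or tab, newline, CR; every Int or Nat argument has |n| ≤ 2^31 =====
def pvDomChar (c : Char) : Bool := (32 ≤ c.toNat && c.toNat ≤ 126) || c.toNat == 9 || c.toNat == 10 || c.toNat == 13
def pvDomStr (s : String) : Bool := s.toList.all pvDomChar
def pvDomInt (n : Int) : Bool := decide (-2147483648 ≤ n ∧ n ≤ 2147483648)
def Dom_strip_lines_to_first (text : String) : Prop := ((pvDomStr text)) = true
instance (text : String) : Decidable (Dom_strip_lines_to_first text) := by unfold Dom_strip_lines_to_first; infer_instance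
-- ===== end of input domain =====

-- B is a single forward fold with an accumulator state machine (indent found on
-- the fly, dedent by prefix comparison, trailing blanks dropped incrementally
-- via a kept/run buffer pair) instead of A's staged passes; same O(n) cost.

-- ===== PORT A =====
-- 'i = 0; for i, x in enumerate(line): if x != " ": break' — i carries the last
-- enumerate index, idx the index of the current element.
def riLoop : Nat → Nat → List Char → Nat
  | i, _, [] => i
  | _, idx, x :: rest => if x ≠ ' ' then idx else riLoop idx (idx + 1) rest

def remove_indent (current_indent : Int) (line : List Char) : List Char :=
  let i : Int := (riLoop 0 0 line : Nat)
  let i : Int := min i current_indent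
  PySem.List.slice line (some i) none

-- 'for i, line in enumerate(lines): if line.lstrip(): first_non_blank = i; break'
def fnbLoop : Nat → List (List Char) → Option Nat
  | _, [] => none
  | idx, l :: rest => if PySem.Chars.lstrip l ≠ [] then some idx else fnbLoop (idx + 1) rest

def strip_lines_to_first (text : String) : String :=
  if text = "" then ""
  else
    let lines := PySem.Chars.splitOn text.toList ['\n']
    match fnbLoop 0 lines with
    | none => ""
    | some first_non_blank =>
      let lines := PySem.List.slice lines (some (first_non_blank : Int)) none
      let first := lines.headD []
      let first_indent : Int := PySem.Chars.len first - PySem.Chars.len (PySem.Chars.lstrip first)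
      let lines := if first_indent ≠ 0 then lines.map (remove_indent first_indent) else lines
      String.ofList (PySem.Chars.rstrip (PySem.Chars.join ['\n'] lines))

-- ===== PORT B =====
-- d = line[k:] if line[:k] == " " * k else line.lstrip(" ").
-- k is always ≥ 0 here (a length difference), so " " * k is replicate k.toNat;
-- lstrip(" ") drops leading spaces only = dropWhile (· == ' ') (exact).
def bCut (k : Int) (line : List Char) : List Char :=
  if PySem.List.slice line none (some k) = List.replicate k.toNat ' ' then
    PySem.List.slice line (some k) none
  else line.dropWhile (· == ' ')

-- loop body once k is known: commit run ++ [d] to kept when d has content,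
-- else append d to the run of pending whitespace-only lines
def bBody (k : Int) (kept run : List (List Char)) (line : List Char) :
    Option Int × List (List Char) × List (List Char) :=
  let d := bCut k line
  if PySem.Chars.strip d ≠ [] then (some k, kept ++ run ++ [d], [])
  else (some k, kept, run ++ [d])

def bStep (st : Option Int × List (List Char) × List (List Char)) (line : List Char) :
    Option Int × List (List Char) × List (List Char) :=
  match st with
  | (none, kept, run) =>
    if PySem.Chars.strip line = [] then (none, kept, run)
    else bBody (PySem.Chars.len line - PySem.Chars.len (PySem.Chars.lstrip line)) kept run line
  | (some k, kept, run) => bBody k kept run line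

-- 'kept[-1] = kept[-1].rstrip()'
def setLastRstrip : List (List Char) → List (List Char)
  | [] => []
  | [a] => [PySem.Chars.rstrip a]
  | a :: b :: r => a :: setLastRstrip (b :: r)

def strip_lines_to_first_alt (text : String) : String :=
  let st := (PySem.Chars.splitOn text.toList ['\n']).foldl bStep (none, [], [])
  match st.2.1 with
  | [] => ""
  | kept => String.ofList (PySem.Chars.join ['\n'] (setLastRstrip kept))

-- ===== PRECONDITION & SPEC =====
-- On texts where, after the first non-blank line (indent k ≥ 1), some line is all
-- spaces with length ≤ k and a later line still has non-whitespace content, A leaves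
-- at least one space on that line (its loop index stops at len-1 when no non-space
-- exists) while B strips all of its spaces leaving it empty — the intended dedent.
def D_strip_lines_to_first (text : String) : Prop :=
  let R := (PySem.Chars.splitOn text.toList ['\n']).dropWhile (List.all · PySem.Chars.isspace)
  ∃ j < R.tail.length, ∃ n ≤ (List.takeWhile PySem.Chars.isspace (R.headD [])).length,
    0 < n ∧ R.tail[j]? = some (List.replicate n ' ') ∧
      (R.tail.drop j).tail.all (List.all · PySem.Chars.isspace) = false
instance (text : String) : Decidable (D_strip_lines_to_first text) := by
  unfold D_strip_lines_to_first; infer_instance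

def Spec_strip_lines_to_first (text : String) (out : String) : Prop :=
  ¬ D_strip_lines_to_first text → out = strip_lines_to_first_alt text
instance (text : String) (out : String) : Decidable (Spec_strip_lines_to_first text out) := by
  unfold Spec_strip_lines_to_first; infer_instance

def pvDiffWitness_strip_lines_to_first : String := " a\n \nb"
def pvDiffWitnessOut_strip_lines_to_first : String × String := ("a\n \nb", "a\n\nb")

-- ===== CLAIM (what is proved, stated in full; the proofs are below) =====
def Claim_unchanged_strip_lines_to_first : Prop := ∀ (text : String), Dom_strip_lines_to_first text → Spec_strip_lines_to_first text (strip_lines_to_first text)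
def Claim_exact_strip_lines_to_first : Prop := ∀ (text : String), Dom_strip_lines_to_first text → D_strip_lines_to_first text → strip_lines_to_first text ≠ strip_lines_to_first_alt text
def Claim_changed_strip_lines_to_first : Prop := Dom_strip_lines_to_first (pvDiffWitness_strip_lines_to_first) ∧ D_strip_lines_to_first (pvDiffWitness_strip_lines_to_first) ∧ strip_lines_to_first (pvDiffWitness_strip_lines_to_first) = pvDiffWitnessOut_strip_lines_to_first.1 ∧ strip_lines_to_first_alt (pvDiffWitness_strip_lines_to_first) = pvDiffWitnessOut_strip_lines_to_first.2 ∧ pvDiffWitnessOut_strip_lines_to_first.1 ≠ pvDiffWitnessOut_strip_lines_to_first.2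

-- ===== LEMMAS AND PROOFS =====

-- proof-side closed form for bCut: drop min(k, number of leading spaces)
def cutSpec (k : Int) (line : List Char) : List Char :=
  PySem.List.slice line (some (min k (PySem.Chars.len line - PySem.Chars.len (line.dropWhile (· == ' '))))) none

-- proof-side count of leading blank lines (A's fnbLoop and B's skipping phase both compute it)
def altBlanks : List (List Char) → Nat
  | [] => 0
  | l :: rest => if PySem.Chars.strip l = [] then altBlanks rest + 1 else 0

-- proof-side closed form of B's whole computation
def altSpec (text : String) : String :=
  let lines := PySem.Chars.splitOn text.toList ['\n']
  let i := altBlanks lines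
  if i = lines.length then ""
  else
    let lines := lines.drop i
    let k : Int := PySem.Chars.len (lines.headD []) - PySem.Chars.len (PySem.Chars.lstrip (lines.headD []))
    String.ofList (PySem.Chars.rstrip (PySem.Chars.join ['\n'] (lines.map (cutSpec k))))

-- proof-side description of the inputs inside D_: some all-space line of length ≤ k
-- followed by a line with real content
def dBad : Nat → List (List Char) → Bool
  | _, [] => false
  | k, l :: rest =>
    (decide (l ≠ []) && l.all (· == ' ') && decide (l.length ≤ k)
      && rest.any (fun m => m.any fun c => !PySem.Chars.isspace c)) || dBad k rest

-- whitespace basics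
theorem rstrip_nil : PySem.Chars.rstrip [] = [] := by simp [PySem.Chars.rstrip]

theorem rstrip_eq_nil_iff (u : List Char) :
    PySem.Chars.rstrip u = [] ↔ ∀ c ∈ u, PySem.Chars.isspace c = true := by
  simp [PySem.Chars.rstrip, List.dropWhile_eq_nil_iff]

theorem lstrip_eq_nil_iff (l : List Char) :
    PySem.Chars.lstrip l = [] ↔ ∀ c ∈ l, PySem.Chars.isspace c = true := by
  simp [PySem.Chars.lstrip, List.dropWhile_eq_nil_iff]

theorem strip_eq_nil_iff (l : List Char) :
    PySem.Chars.strip l = [] ↔ ∀ c ∈ l, PySem.Chars.isspace c = true := by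
  unfold PySem.Chars.strip PySem.Chars.lstrip
  rw [rstrip_eq_nil_iff]
  constructor
  · intro h c hc
    rw [← List.takeWhile_append_dropWhile (p := PySem.Chars.isspace) (l := l)] at hc
    rcases List.mem_append.mp hc with h1 | h1
    · exact List.mem_takeWhile_imp h1
    · exact h c h1
  · intro h c hc
    exact h c ((List.dropWhile_sublist _).subset hc)

theorem blank_iff (l : List Char) : PySem.Chars.lstrip l = [] ↔ PySem.Chars.strip l = [] := by
  rw [lstrip_eq_nil_iff, strip_eq_nil_iff]

theorem rstrip_append (a b : List Char) :
    PySem.Chars.rstrip (a ++ b) =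
      if PySem.Chars.rstrip b = [] then PySem.Chars.rstrip a else a ++ PySem.Chars.rstrip b := by
  simp only [PySem.Chars.rstrip, List.reverse_append, List.dropWhile_append,
    List.isEmpty_iff, List.reverse_eq_nil_iff]
  split_ifs with h1
  · rfl
  · simp

-- join of whitespace-only lines is whitespace-only
theorem join_allws (X : List (List Char))
    (h : ∀ l ∈ X, ∀ c ∈ l, PySem.Chars.isspace c = true) :
    ∀ c ∈ PySem.Chars.join ['\n'] X, PySem.Chars.isspace c = true := by
  induction X with
  | nil => simp [PySem.Chars.join_nil]
  | cons a X ih =>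
    cases X with
    | nil =>
      rw [PySem.Chars.join_singleton]
      exact h a (by simp)
    | cons b X' =>
      rw [PySem.Chars.join_cons_cons]
      intro c hc
      rcases List.mem_append.mp hc with hc | hc
      · rcases List.mem_append.mp hc with hc | hc
        · exact h a (by simp) c hc
        · simp only [List.mem_singleton] at hc; subst hc; decide
      · exact ih (fun l hl => h l (List.mem_cons_of_mem _ hl)) c hc

theorem rstrip_join_cons (a : List Char) (X : List (List Char)) :
    PySem.Chars.rstrip (PySem.Chars.join ['\n'] (a :: X)) =
      if PySem.Chars.rstrip (PySem.Chars.join ['\n'] X) = [] then PySem.Chars.rstrip a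
      else a ++ '\n' :: PySem.Chars.rstrip (PySem.Chars.join ['\n'] X) := by
  cases X with
  | nil => simp [PySem.Chars.join_singleton, PySem.Chars.join_nil, rstrip_nil]
  | cons b X' =>
    rw [PySem.Chars.join_cons_cons, List.append_assoc, rstrip_append]
    have h1 : PySem.Chars.rstrip (['\n'] ++ PySem.Chars.join ['\n'] (b :: X')) =
        if PySem.Chars.rstrip (PySem.Chars.join ['\n'] (b :: X')) = [] then []
        else '\n' :: PySem.Chars.rstrip (PySem.Chars.join ['\n'] (b :: X')) := by
      rw [rstrip_append]
      split_ifs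
      · exact (rstrip_eq_nil_iff _).mpr (by intro c hc; simp only [List.mem_singleton] at hc; subst hc; decide)
      · rfl
    rw [h1]
    split_ifs with h2 h3 h3
    · rfl
    · exact absurd rfl h3
    · exact absurd h3 (by simp)
    · rfl

-- the two outputs agree up to a tail of whitespace-only lines
inductive WsRel : List (List Char) → List (List Char) → Prop
  | ws : ∀ (X Y : List (List Char)), (∀ l ∈ X, ∀ c ∈ l, PySem.Chars.isspace c = true) →
      (∀ l ∈ Y, ∀ c ∈ l, PySem.Chars.isspace c = true) → WsRel X Y
  | cons : ∀ (a : List Char) (X Y : List (List Char)), WsRel X Y → WsRel (a :: X) (a :: Y)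

theorem wsrel_join {X Y : List (List Char)} (h : WsRel X Y) :
    PySem.Chars.rstrip (PySem.Chars.join ['\n'] X) = PySem.Chars.rstrip (PySem.Chars.join ['\n'] Y) := by
  induction h with
  | ws X Y hX hY =>
    rw [(rstrip_eq_nil_iff _).mpr (join_allws X hX), (rstrip_eq_nil_iff _).mpr (join_allws Y hY)]
  | cons a X Y h ih => rw [rstrip_join_cons, rstrip_join_cons, ih]

theorem slice_subset {l : List Char} {a b : Option Int} : ∀ c ∈ PySem.List.slice l a b, c ∈ l := by
  intro c hc
  unfold PySem.List.slice at hc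
  exact ((List.take_sublist _ _).trans (List.drop_sublist _ _)).subset hc

theorem len_sub_dropWhile (p : Char → Bool) (l : List Char) :
    (l.length : Int) - ((l.dropWhile p).length : Int) = ((l.takeWhile p).length : Int) := by
  have h := congrArg List.length (List.takeWhile_append_dropWhile (p := p) (l := l))
  simp only [List.length_append] at h
  omega

theorem riLoop_char (l : List Char) : ∀ (i0 idx : Nat),
    riLoop i0 idx l = if l = [] then i0
      else if l.all (· == ' ') then idx + (l.length - 1)
      else idx + (l.takeWhile (· == ' ')).length := by
  induction l with
  | nil => intro i0 idx; simp [riLoop]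
  | cons x rest ih =>
    intro i0 idx
    by_cases hx : x = ' '
    · subst hx
      rw [show riLoop i0 idx (' ' :: rest) = riLoop idx (idx + 1) rest from by simp [riLoop]]
      rw [ih idx (idx + 1)]
      cases rest with
      | nil => simp
      | cons y rest' =>
        rw [if_neg (by simp : ¬(y :: rest') = []), if_neg (by simp : ¬(' ' :: y :: rest') = [])]
        have hsame : (' ' :: y :: rest').all (· == ' ') = (y :: rest').all (· == ' ') := by
          simp
        by_cases hall : (y :: rest').all (· == ' ') = true
        · rw [if_pos hall, if_pos (hsame.trans hall)]
          simp only [List.length_cons]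
          omega
        · rw [if_neg hall, if_neg (fun hh => hall (hsame.symm.trans hh))]
          rw [show List.takeWhile (· == ' ') (' ' :: y :: rest') =
              ' ' :: List.takeWhile (· == ' ') (y :: rest') from by simp [List.takeWhile_cons]]
          simp only [List.length_cons]
          omega
    · rw [show riLoop i0 idx (x :: rest) = idx from by simp [riLoop, hx]]
      rw [if_neg (by simp : ¬(x :: rest) = [])]
      rw [if_neg (by simp [hx] : ¬((x :: rest).all (· == ' ')) = true)]
      rw [show List.takeWhile (· == ' ') (x :: rest) = [] from by simp [hx]]
      simp

theorem line_eq (k : Int) (hk : 1 ≤ k) (l : List Char)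
    (h : ¬(l ≠ [] ∧ l.all (· == ' ') = true ∧ l.length ≤ k.toNat)) :
    remove_indent k l = cutSpec k l := by
  have hA : remove_indent k l
      = PySem.List.slice l (some (min ((riLoop 0 0 l : Nat) : Int) k)) none := rfl
  have hB : cutSpec k l
      = PySem.List.slice l (some (min k ((l.takeWhile (· == ' ')).length : Int))) none := by
    unfold cutSpec
    rw [show PySem.Chars.len l - PySem.Chars.len (l.dropWhile (· == ' '))
        = ((l.takeWhile (· == ' ')).length : Int) from by
      rw [PySem.Chars.len_eq, PySem.Chars.len_eq, len_sub_dropWhile]]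
  suffices hkey : min ((riLoop 0 0 l : Nat) : Int) k
      = min k ((l.takeWhile (· == ' ')).length : Int) by
    rw [hA, hB, hkey]
  rw [riLoop_char]
  by_cases hnil : l = []
  · subst hnil
    simp only [List.takeWhile_nil, List.length_nil, reduceIte]
    omega
  · rw [if_neg hnil]
    by_cases hall : l.all (· == ' ') = true
    · have hlt : k.toNat < l.length := by
        rcases Nat.lt_or_ge k.toNat l.length with h1 | h1
        · exact h1
        · exact absurd ⟨hnil, hall, h1⟩ h
      have htw : List.takeWhile (· == ' ') l = l := List.takeWhile_eq_self_iff.mpr (by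
        intro c hc
        exact (List.all_eq_true.mp hall) c hc)
      rw [if_pos hall, htw]
      omega
    · rw [if_neg hall, Nat.zero_add, min_comm]

theorem allspace_ws {l : List Char} (h : l.all (· == ' ') = true) :
    ∀ c ∈ l, PySem.Chars.isspace c = true := by
  intro c hc
  have h2 := (List.all_eq_true.mp h) c hc
  have h3 : c = ' ' := by simpa using h2
  subst h3; decide

theorem map_rel (k : Int) (hk : 1 ≤ k) : ∀ (R : List (List Char)), dBad k.toNat R = false →
    WsRel (R.map (remove_indent k)) (R.map (cutSpec k)) := by
  intro R
  induction R with
  | nil => intro _; exact WsRel.ws [] [] (by simp) (by simp)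
  | cons l rest ih =>
    intro h
    simp only [dBad, Bool.or_eq_false_iff] at h
    obtain ⟨h1, h2⟩ := h
    by_cases hbad : l ≠ [] ∧ l.all (· == ' ') = true ∧ l.length ≤ k.toNat
    · obtain ⟨hne, hsp, hle⟩ := hbad
      have hany : rest.any (fun m => m.any fun c => !PySem.Chars.isspace c) = false := by
        simpa [hne, hsp, hle] using h1
      have hrest : ∀ m ∈ rest, ∀ c ∈ m, PySem.Chars.isspace c = true := by
        intro m hm c hc
        by_contra hw
        have : rest.any (fun m => m.any fun c => !PySem.Chars.isspace c) = true :=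
          List.any_eq_true.mpr ⟨m, hm, List.any_eq_true.mpr ⟨c, hc, by simp [hw]⟩⟩
        rw [this] at hany; cases hany
      have hmem : ∀ x ∈ l :: rest, ∀ c ∈ x, PySem.Chars.isspace c = true := by
        intro x hx
        rcases List.mem_cons.mp hx with rfl | hx'
        · exact allspace_ws hsp
        · exact hrest x hx'
      apply WsRel.ws
      · intro l' hl'
        rw [List.mem_map] at hl'
        obtain ⟨x, hx, rfl⟩ := hl'
        intro c hc
        have hcx : c ∈ x := by
          unfold remove_indent at hc
          exact slice_subset c hc
        exact hmem x hx c hcx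
      · intro l' hl'
        rw [List.mem_map] at hl'
        obtain ⟨x, hx, rfl⟩ := hl'
        intro c hc
        have hcx : c ∈ x := by
          unfold cutSpec at hc
          exact slice_subset c hc
        exact hmem x hx c hcx
    · rw [List.map_cons, List.map_cons, line_eq k hk l hbad]
      exact WsRel.cons _ _ _ (ih h2)

theorem altBlanks_le (L : List (List Char)) : altBlanks L ≤ L.length := by
  induction L with
  | nil => simp [altBlanks]
  | cons l rest ih =>
    unfold altBlanks
    split_ifs
    · simp
      omega
    · simp

theorem fnb_alt (L : List (List Char)) : ∀ (idx : Nat),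
    fnbLoop idx L = if altBlanks L = L.length then none else some (idx + altBlanks L) := by
  induction L with
  | nil => intro idx; simp [fnbLoop, altBlanks]
  | cons l rest ih =>
    intro idx
    by_cases hb : PySem.Chars.lstrip l = []
    · have hs : PySem.Chars.strip l = [] := (blank_iff l).mp hb
      simp only [fnbLoop, ne_eq, hb, not_true_eq_false, altBlanks, hs, if_true,
        ih (idx + 1), List.length_cons, reduceIte]
      split_ifs with h1 h2 h2
      · rfl
      · omega
      · omega
      · congr 1; omega
    · have hs : PySem.Chars.strip l ≠ [] := fun hh => hb ((blank_iff l).mpr hh)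
      simp [fnbLoop, hb, altBlanks, hs]

theorem altBlanks_head (L : List (List Char)) (h : altBlanks L < L.length) :
    ∃ f r, L.drop (altBlanks L) = f :: r ∧ PySem.Chars.strip f ≠ [] := by
  induction L with
  | nil => simp at h
  | cons l rest ih =>
    by_cases hs : PySem.Chars.strip l = []
    · have he : altBlanks (l :: rest) = altBlanks rest + 1 := by simp [altBlanks, hs]
      rw [he] at h ⊢
      simp only [List.length_cons] at h
      simpa using ih (by omega)
    · have he : altBlanks (l :: rest) = 0 := by simp [altBlanks, hs]
      rw [he]
      exact ⟨l, rest, rfl, hs⟩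

theorem dropWhile_blank_eq (L : List (List Char)) :
    L.dropWhile (·.all PySem.Chars.isspace) = L.drop (altBlanks L) := by
  induction L with
  | nil => simp [altBlanks]
  | cons l rest ih =>
    by_cases hs : PySem.Chars.strip l = []
    · have hb : l.all PySem.Chars.isspace = true := by
        simpa [List.all_eq_true] using (strip_eq_nil_iff l).mp hs
      rw [show List.dropWhile (·.all PySem.Chars.isspace) (l :: rest)
          = List.dropWhile (·.all PySem.Chars.isspace) rest from by
        simp [hb], ih]
      simp [altBlanks, hs]
    · have hb : l.all PySem.Chars.isspace = false := by
        cases hbb : l.all PySem.Chars.isspace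
        · rfl
        · exact absurd ((strip_eq_nil_iff l).mpr (by simpa [List.all_eq_true] using hbb)) hs
      rw [show List.dropWhile (·.all PySem.Chars.isspace) (l :: rest)
          = l :: rest from by simp [hb]]
      simp [altBlanks, hs]

theorem dBad_iff (k : Nat) (r : List (List Char)) : dBad k r = true ↔
    ∃ j < r.length, ∃ n ≤ k, 0 < n ∧ r[j]? = some (List.replicate n ' ') ∧
      (r.drop (j + 1)).all (·.all PySem.Chars.isspace) = false := by
  induction r with
  | nil => simp [dBad]
  | cons l rest ih =>
    simp only [dBad, Bool.or_eq_true, ih]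
    constructor
    · rintro (h | ⟨j, hj, n, hn, hn0, hget, hafter⟩)
      · simp only [Bool.and_eq_true, decide_eq_true_eq, List.any_eq_true,
          Bool.not_eq_eq_eq_not, Bool.not_true] at h
        obtain ⟨⟨⟨hne, hsp⟩, hle⟩, m, hm, c, hc, hcs⟩ := h
        refine ⟨0, by simp, l.length, hle, List.length_pos_iff.mpr hne, ?_, ?_⟩
        · simp only [List.getElem?_cons_zero, Option.some.injEq]
          exact List.eq_replicate_length.mpr (by
            intro b hb
            simpa using (List.all_eq_true.mp hsp) b hb)
        · simp only [Nat.zero_add, List.drop_one, List.tail_cons]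
          rcases hall : rest.all (·.all PySem.Chars.isspace)
          · rfl
          · exact absurd ((List.all_eq_true.mp ((List.all_eq_true.mp hall) m hm)) c hc)
              (by simp [hcs])
      · exact ⟨j + 1, by simpa using hj, n, hn, hn0, by simpa using hget, by simpa using hafter⟩
    · rintro ⟨j, hj, n, hn, hn0, hget, hafter⟩
      cases j with
      | zero =>
        left
        simp only [List.getElem?_cons_zero, Option.some.injEq] at hget
        subst hget
        simp only [Nat.zero_add, List.drop_one, List.tail_cons] at hafter
        obtain ⟨m, hm, hmb⟩ := List.all_eq_false.mp hafter
        obtain ⟨c, hc, hcb⟩ := List.all_eq_false.mp (Bool.eq_false_iff.mpr hmb)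
        simp only [Bool.and_eq_true, decide_eq_true_eq, List.any_eq_true]
        exact ⟨⟨⟨by simpa using hn0.ne', by simp⟩, by simpa using hn⟩, m, hm, c, hc, by simp [hcb]⟩
      | succ j =>
        right
        exact ⟨j, by simpa using hj, n, hn, hn0, by simpa using hget, by simpa using hafter⟩

-- ===== bridging B's fold to the closed form altSpec =====

theorem dropWhile_eq_drop (p : Char → Bool) (l : List Char) :
    l.dropWhile p = l.drop (l.takeWhile p).length := by
  have h2 := List.takeWhile_append_dropWhile (p := p) (l := l)
  calc l.dropWhile p
      = List.drop (l.takeWhile p).length (l.takeWhile p ++ l.dropWhile p) := List.drop_left.symm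
    _ = l.drop (l.takeWhile p).length := by rw [h2]

theorem bCut_eq_cutSpec (k : Int) (hk : 0 ≤ k) (l : List Char) : bCut k l = cutSpec k l := by
  have hs : PySem.Chars.len l - PySem.Chars.len (l.dropWhile (· == ' '))
      = ((l.takeWhile (· == ' ')).length : Int) := by
    rw [PySem.Chars.len_eq, PySem.Chars.len_eq, len_sub_dropWhile]
  set s : Nat := (l.takeWhile (· == ' ')).length with hsdef
  have hBspec : cutSpec k l = l.drop (min k (s : Int)).toNat := by
    unfold cutSpec
    rw [hs, PySem.List.slice_from _ (by omega)]
  have htake : PySem.List.slice l none (some k) = l.take k.toNat := by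
    conv_lhs => rw [show k = ((k.toNat : Nat) : Int) from by omega]
    rw [PySem.List.slice_to_natCast]
  have hdrop : PySem.List.slice l (some k) none = l.drop k.toNat := by
    conv_lhs => rw [show k = ((k.toNat : Nat) : Int) from by omega]
    rw [PySem.List.slice_from_natCast]
  have hsle : s ≤ l.length := by
    have := (List.takeWhile_sublist (p := (· == ' ')) (l := l)).length_le
    omega
  unfold bCut
  rw [htake, hdrop, hBspec]
  by_cases hle : k.toNat ≤ s
  · have heq : l.take k.toNat = List.replicate k.toNat ' ' := by
      have h1 : l.take k.toNat = (l.takeWhile (· == ' ')).take k.toNat := by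
        conv_lhs => rw [← List.takeWhile_append_dropWhile (p := (· == ' ')) (l := l)]
        rw [List.take_append, Nat.sub_eq_zero_of_le (by omega), List.take_zero, List.append_nil]
      rw [h1]
      refine List.eq_replicate_iff.mpr ⟨?_, ?_⟩
      · rw [List.length_take]
        omega
      · intro b hb
        have hbm : b ∈ l.takeWhile (· == ' ') := (List.take_sublist _ _).subset hb
        simpa using List.mem_takeWhile_imp hbm
    rw [if_pos heq]
    congr 1
    omega
  · have hlt : s < k.toNat := by omega
    have hne : l.take k.toNat ≠ List.replicate k.toNat ' ' := by
      intro hcon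
      have hlen : (l.take k.toNat).length = k.toNat := by rw [hcon, List.length_replicate]
      have hllen : k.toNat ≤ l.length := by
        rw [List.length_take] at hlen; omega
      have hslt : s < l.length := by omega
      have hsp : l[s] = ' ' := by
        have h3 : (l.take k.toNat)[s]? = l[s]? := List.getElem?_take_of_lt hlt
        rw [hcon, List.getElem?_replicate, if_pos hlt, List.getElem?_eq_getElem hslt] at h3
        exact (Option.some_inj.mp h3).symm
      have hhead : (l.dropWhile (· == ' ')).head? = some (l[s]'hslt) := by
        rw [dropWhile_eq_drop, ← hsdef, List.head?_drop, List.getElem?_eq_getElem hslt]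
      have := List.head?_dropWhile_not (p := (· == ' ')) (l := l)
      rw [hhead] at this
      rw [hsp] at this
      simp at this
    rw [if_neg hne]
    rw [dropWhile_eq_drop, ← hsdef]
    congr 1
    omega

theorem setLastRstrip_concat : ∀ (P : List (List Char)) (g : List Char),
    setLastRstrip (P ++ [g]) = P ++ [PySem.Chars.rstrip g] := by
  intro P g
  induction P with
  | nil => rfl
  | cons a P' ih =>
    cases P' with
    | nil => rfl
    | cons b P'' =>
      show a :: setLastRstrip ((b :: P'') ++ [g]) = a :: ((b :: P'') ++ [PySem.Chars.rstrip g])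
      rw [ih]

theorem join_concat : ∀ (P : List (List Char)) (g : List Char),
    PySem.Chars.join ['\n'] (P ++ [g])
      = PySem.Chars.join ['\n'] P ++ (if P = [] then [] else ['\n']) ++ g := by
  intro P g
  induction P with
  | nil => simp [PySem.Chars.join_singleton, PySem.Chars.join_nil]
  | cons a P' ih =>
    cases P' with
    | nil => simp [PySem.Chars.join_singleton, PySem.Chars.join_cons_cons]
    | cons b P'' =>
      have h1 : (a :: b :: P'') ++ [g] = a :: (b :: (P'' ++ [g])) := by simp
      rw [List.cons_append] at ih
      rw [h1, PySem.Chars.join_cons_cons, ih, PySem.Chars.join_cons_cons]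
      simp [List.append_assoc]

theorem rstrip_join_concat (g : List Char) (hg : PySem.Chars.rstrip g ≠ []) :
    ∀ (P : List (List Char)), PySem.Chars.rstrip (PySem.Chars.join ['\n'] (P ++ [g]))
      = PySem.Chars.join ['\n'] P ++ (if P = [] then [] else ['\n']) ++ PySem.Chars.rstrip g := by
  intro P
  induction P with
  | nil => simp [PySem.Chars.join_singleton, PySem.Chars.join_nil]
  | cons a P' ih =>
    rw [List.cons_append, rstrip_join_cons]
    have hne : PySem.Chars.rstrip (PySem.Chars.join ['\n'] (P' ++ [g])) ≠ [] := by
      rw [ih]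
      exact List.append_ne_nil_of_right_ne_nil _ hg
    rw [if_neg hne, ih]
    cases P' with
    | nil => simp [PySem.Chars.join_nil, PySem.Chars.join_singleton]
    | cons b P'' =>
      rw [PySem.Chars.join_cons_cons]
      simp [List.append_assoc]

theorem strip_rstrip_ne {g : List Char} (h : PySem.Chars.strip g ≠ []) :
    PySem.Chars.rstrip g ≠ [] := by
  intro hcon
  exact h ((strip_eq_nil_iff g).mpr ((rstrip_eq_nil_iff g).mp hcon))

-- main fold invariant for B once k is known
theorem bFold (k : Int) : ∀ (r : List (List Char)) (kept run : List (List Char)),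
    (∀ l ∈ run, ∀ c ∈ l, PySem.Chars.isspace c = true) →
    (∀ hne : kept ≠ [], PySem.Chars.strip (kept.getLast hne) ≠ []) →
    ∃ kept' run', List.foldl bStep (some k, kept, run) r = (some k, kept', run') ∧
      kept' ++ run' = kept ++ run ++ r.map (bCut k) ∧
      (∀ l ∈ run', ∀ c ∈ l, PySem.Chars.isspace c = true) ∧
      (∀ hne : kept' ≠ [], PySem.Chars.strip (kept'.getLast hne) ≠ []) ∧
      (kept ≠ [] → kept' ≠ []) := by
  intro r
  induction r with
  | nil =>
    intro kept run hrun hlast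
    exact ⟨kept, run, rfl, by simp, hrun, hlast, fun h => h⟩
  | cons a r' ih =>
    intro kept run hrun hlast
    have hstep : List.foldl bStep (some k, kept, run) (a :: r')
        = List.foldl bStep (bBody k kept run a) r' := rfl
    by_cases hd : PySem.Chars.strip (bCut k a) = []
    · have hb : bBody k kept run a = (some k, kept, run ++ [bCut k a]) := by
        simp [bBody, hd]
      rw [hstep, hb]
      obtain ⟨kept', run', hfold, happ, hrun', hlast', hne'⟩ :=
        ih kept (run ++ [bCut k a])
          (by
            intro l hl
            rcases List.mem_append.mp hl with h1 | h1
            · exact hrun l h1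
            · simp only [List.mem_singleton] at h1
              subst h1
              exact (strip_eq_nil_iff _).mp hd)
          hlast
      refine ⟨kept', run', hfold, ?_, hrun', hlast', hne'⟩
      rw [happ]
      simp [List.append_assoc]
    · have hb : bBody k kept run a = (some k, kept ++ run ++ [bCut k a], []) := by
        simp [bBody, hd]
      rw [hstep, hb]
      obtain ⟨kept', run', hfold, happ, hrun', hlast', hne'⟩ :=
        ih (kept ++ run ++ [bCut k a]) []
          (by simp)
          (by
            intro hne
            rw [show (kept ++ run ++ [bCut k a]).getLast hne = bCut k a from by simp]
            exact hd)
      refine ⟨kept', run', hfold, ?_, hrun', hlast', fun _ => hne' (by simp)⟩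
      rw [happ]
      simp [List.append_assoc]

-- skipping phase: leading blank lines are dropped
theorem bPhase : ∀ (L : List (List Char)),
    List.foldl bStep ((none : Option Int), ([] : List (List Char)), ([] : List (List Char))) L
      = match L.dropWhile (·.all PySem.Chars.isspace) with
        | [] => (none, [], [])
        | f :: r => List.foldl bStep
            (bBody (PySem.Chars.len f - PySem.Chars.len (PySem.Chars.lstrip f)) [] [] f) r := by
  intro L
  induction L with
  | nil => rfl
  | cons a L' ih =>
    by_cases hs : PySem.Chars.strip a = []
    · have hb : a.all PySem.Chars.isspace = true := by
        simpa [List.all_eq_true] using (strip_eq_nil_iff a).mp hs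
      have h1 : List.foldl bStep (none, [], []) (a :: L')
          = List.foldl bStep (none, [], []) L' := by
        show List.foldl bStep (bStep (none, [], []) a) L' = _
        simp [bStep, hs]
      rw [h1, ih]
      rw [show List.dropWhile (·.all PySem.Chars.isspace) (a :: L')
          = List.dropWhile (·.all PySem.Chars.isspace) L' from by simp [hb]]
    · have hb : a.all PySem.Chars.isspace = false := by
        cases hbb : a.all PySem.Chars.isspace
        · rfl
        · exact absurd ((strip_eq_nil_iff a).mpr (by simpa [List.all_eq_true] using hbb)) hs
      rw [show List.dropWhile (·.all PySem.Chars.isspace) (a :: L') = a :: L' from by simp [hb]]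
      show List.foldl bStep (bStep (none, [], []) a) L' = _
      simp [bStep, hs]

theorem indent_nonneg (f : List Char) :
    0 ≤ PySem.Chars.len f - PySem.Chars.len (PySem.Chars.lstrip f) := by
  rw [PySem.Chars.len_eq, PySem.Chars.lstrip, PySem.Chars.len_eq]
  have := List.length_dropWhile_le (p := PySem.Chars.isspace) (l := f)
  omega

theorem cut_keeps_content (k : Int) (hk : 0 ≤ k) (f : List Char)
    (hf : PySem.Chars.strip f ≠ []) : PySem.Chars.strip (bCut k f) ≠ [] := by
  rw [bCut_eq_cutSpec k hk]
  have hc : ∃ c ∈ f, ¬PySem.Chars.isspace c = true := by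
    by_contra hcon
    refine hf ((strip_eq_nil_iff f).mpr (fun c hcf => ?_))
    by_contra hw
    exact hcon ⟨c, hcf, hw⟩
  obtain ⟨c, hcf, hcw⟩ := hc
  intro hnil
  apply hcw
  apply (strip_eq_nil_iff _).mp hnil c
  -- c survives the dedent: cutSpec drops at most the leading spaces
  have hs : PySem.Chars.len f - PySem.Chars.len (f.dropWhile (· == ' '))
      = ((f.takeWhile (· == ' ')).length : Int) := by
    rw [PySem.Chars.len_eq, PySem.Chars.len_eq, len_sub_dropWhile]
  unfold cutSpec
  rw [hs, PySem.List.slice_from _ (by omega)]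
  set m := (min k ((f.takeWhile (· == ' ')).length : Int)).toNat with hm
  have hmle : m ≤ (f.takeWhile (· == ' ')).length := by omega
  have hcd : c ∈ f.dropWhile (· == ' ') := by
    rw [← List.takeWhile_append_dropWhile (p := (· == ' ')) (l := f)] at hcf
    rcases List.mem_append.mp hcf with h1 | h1
    · have hsp : c = ' ' := by simpa using List.mem_takeWhile_imp h1
      subst hsp
      exact absurd (by decide) hcw
    · exact h1
  rw [dropWhile_eq_drop] at hcd
  have hsub : f.drop (f.takeWhile (· == ' ')).length
      = (f.drop m).drop ((f.takeWhile (· == ' ')).length - m) := by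
    rw [List.drop_drop]
    congr 1
    omega
  rw [hsub] at hcd
  exact (List.drop_sublist _ _).subset hcd

theorem wsrel_append_blank (Pm Qm : List (List Char))
    (hQ : ∀ l ∈ Qm, ∀ c ∈ l, PySem.Chars.isspace c = true) : WsRel (Pm ++ Qm) Pm := by
  induction Pm with
  | nil => exact WsRel.ws Qm [] hQ (by simp)
  | cons a P ih => exact WsRel.cons a _ _ ih

-- finishing step: 'kept[-1] = kept[-1].rstrip(); join' equals rstrip(join(kept ++ run))
theorem finish_eq (kept run : List (List Char)) (hne : kept ≠ [])
    (hrun : ∀ l ∈ run, ∀ c ∈ l, PySem.Chars.isspace c = true)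
    (hlast : PySem.Chars.strip (kept.getLast hne) ≠ []) :
    PySem.Chars.join ['\n'] (setLastRstrip kept)
      = PySem.Chars.rstrip (PySem.Chars.join ['\n'] (kept ++ run)) := by
  rw [wsrel_join (wsrel_append_blank kept run hrun)]
  obtain ⟨P, g, hPg⟩ : ∃ P g, kept = P ++ [g] := ⟨kept.dropLast, kept.getLast hne, (List.dropLast_append_getLast hne).symm⟩
  subst hPg
  have hg : PySem.Chars.strip g ≠ [] := by
    rw [show (P ++ [g]).getLast hne = g from by simp] at hlast
    exact hlast
  rw [setLastRstrip_concat, join_concat, rstrip_join_concat g (strip_rstrip_ne hg) P]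

-- B's port computes altSpec
theorem altForm (text : String) : strip_lines_to_first_alt text = altSpec text := by
  unfold strip_lines_to_first_alt altSpec
  set L := PySem.Chars.splitOn text.toList ['\n'] with hL
  rcases hdw : L.dropWhile (·.all PySem.Chars.isspace) with _ | ⟨f, r⟩
  · -- all lines blank
    have hfold : L.foldl bStep (none, [], []) = (none, [], []) := by
      rw [bPhase, hdw]
    rw [hfold]
    have hlen : altBlanks L = L.length := by
      rw [dropWhile_blank_eq] at hdw
      have h1 := altBlanks_le L
      rw [List.drop_eq_nil_iff] at hdw
      omega
    rw [if_pos hlen]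
  · have hlen : ¬altBlanks L = L.length := by
      intro hcon
      rw [dropWhile_blank_eq, hcon, List.drop_length] at hdw
      cases hdw
    have hdrop : L.drop (altBlanks L) = f :: r := by rw [← dropWhile_blank_eq, hdw]
    rw [if_neg hlen, hdrop]
    simp only [List.headD_cons]
    set k : Int := PySem.Chars.len f - PySem.Chars.len (PySem.Chars.lstrip f) with hk
    have hk0 : 0 ≤ k := indent_nonneg f
    have hf : PySem.Chars.strip f ≠ [] := by
      have hdwne : L.dropWhile (·.all PySem.Chars.isspace) ≠ [] := by rw [hdw]; simp
      have hhead := List.head_dropWhile_not (p := (·.all PySem.Chars.isspace)) (l := L) hdwne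
      have : (L.dropWhile (·.all PySem.Chars.isspace)).head hdwne = f := by
        simp [hdw]
      rw [this] at hhead
      intro hcon
      rw [show f.all PySem.Chars.isspace = true from by
        simpa [List.all_eq_true] using (strip_eq_nil_iff f).mp hcon] at hhead
      cases hhead
    have hdcontent : PySem.Chars.strip (bCut k f) ≠ [] := cut_keeps_content k hk0 f hf
    have hfirst : bBody k [] [] f = (some k, [bCut k f], []) := by
      simp [bBody, hdcontent]
    have hfold1 : L.foldl bStep (none, [], []) = List.foldl bStep (some k, [bCut k f], []) r := by
      rw [bPhase, hdw]
      exact congrArg (fun st => List.foldl bStep st r) hfirst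
    obtain ⟨kept', run', hfold, happ, hrun', hlast', hne'⟩ :=
      bFold k r [bCut k f] []
        (by simp)
        (by
          intro _
          simpa using hdcontent)
    have hkne : kept' ≠ [] := hne' (by simp)
    have happ2 : kept' ++ run' = (f :: r).map (cutSpec k) := by
      rw [happ]
      simp only [List.map_cons, List.singleton_append]
      rw [bCut_eq_cutSpec k hk0]
      congr 1
      exact List.map_congr_left (fun a _ => bCut_eq_cutSpec k hk0 a)
    have hfin : PySem.Chars.join ['\n'] (setLastRstrip kept')
        = PySem.Chars.rstrip (PySem.Chars.join ['\n'] ((f :: r).map (cutSpec k))) := by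
      rw [← happ2]
      exact finish_eq kept' run' hkne hrun' (hlast' hkne)
    rw [hfold1, hfold]
    cases kept' with
    | nil => exact absurd rfl hkne
    | cons a ks =>
      show String.ofList (PySem.Chars.join ['\n'] (setLastRstrip (a :: ks))) = _
      rw [hfin]

-- lemmas for the tightness theorem: inside D_ the outputs differ in length

theorem join_length : ∀ (X : List (List Char)), X ≠ [] →
    (PySem.Chars.join ['\n'] X).length = (X.map List.length).sum + X.length - 1 := by
  intro X
  induction X with
  | nil => intro h; exact absurd rfl h
  | cons a X' ih =>
    intro _
    cases X' with
    | nil => simp [PySem.Chars.join_singleton]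
    | cons b X'' =>
      rw [PySem.Chars.join_cons_cons]
      have h := ih (by simp)
      rw [List.length_append, List.length_append, h]
      simp only [List.length_cons, List.map_cons, List.sum_cons, List.length_nil]
      omega

theorem slice_from_length (l : List Char) (m : Int) (hm : 0 ≤ m) :
    (PySem.List.slice l (some m) none).length = l.length - m.toNat := by
  rw [PySem.List.slice_from l hm, List.length_drop]

theorem riLoop_le (l : List Char) : riLoop 0 0 l ≤ (l.takeWhile (· == ' ')).length := by
  rw [riLoop_char]
  by_cases hnil : l = []
  · subst hnil; simp
  · rw [if_neg hnil]
    by_cases hall : l.all (· == ' ') = true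
    · rw [if_pos hall]
      have htw : List.takeWhile (· == ' ') l = l := List.takeWhile_eq_self_iff.mpr (by
        intro c hc
        exact (List.all_eq_true.mp hall) c hc)
      rw [htw]
      omega
    · rw [if_neg hall]
      omega

theorem line_len_le (k : Int) (hk : 1 ≤ k) (l : List Char) :
    (cutSpec k l).length ≤ (remove_indent k l).length := by
  have hA : remove_indent k l
      = PySem.List.slice l (some (min ((riLoop 0 0 l : Nat) : Int) k)) none := rfl
  have hB : cutSpec k l
      = PySem.List.slice l (some (min k ((l.takeWhile (· == ' ')).length : Int))) none := by
    unfold cutSpec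
    rw [show PySem.Chars.len l - PySem.Chars.len (l.dropWhile (· == ' '))
        = ((l.takeWhile (· == ' ')).length : Int) from by
      rw [PySem.Chars.len_eq, PySem.Chars.len_eq, len_sub_dropWhile]]
  have hle := riLoop_le l
  rw [hA, hB, slice_from_length _ _ (by omega), slice_from_length _ _ (by omega)]
  omega

theorem bad_line_lengths (k : Int) (hk : 1 ≤ k) (n : Nat) (hn : 0 < n) (hnk : n ≤ k.toNat) :
    (remove_indent k (List.replicate n ' ')).length = 1 ∧
      (cutSpec k (List.replicate n ' ')).length = 0 := by
  have hall : (List.replicate n ' ').all (· == ' ') = true :=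
    List.all_eq_true.mpr (fun c hc => by rw [List.eq_of_mem_replicate hc]; rfl)
  have htw : List.takeWhile (· == ' ') (List.replicate n ' ') = List.replicate n ' ' :=
    List.takeWhile_eq_self_iff.mpr (fun c hc => by rw [List.eq_of_mem_replicate hc]; rfl)
  have hA : remove_indent k (List.replicate n ' ')
      = PySem.List.slice (List.replicate n ' ')
          (some (min ((riLoop 0 0 (List.replicate n ' ') : Nat) : Int) k)) none := rfl
  have hB : cutSpec k (List.replicate n ' ')
      = PySem.List.slice (List.replicate n ' ')
          (some (min k ((List.replicate n ' ' |>.takeWhile (· == ' ')).length : Int))) none := by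
    unfold cutSpec
    rw [show PySem.Chars.len (List.replicate n ' ')
          - PySem.Chars.len ((List.replicate n ' ').dropWhile (· == ' '))
        = (((List.replicate n ' ').takeWhile (· == ' ')).length : Int) from by
      rw [PySem.Chars.len_eq, PySem.Chars.len_eq, len_sub_dropWhile]]
  have hri : riLoop 0 0 (List.replicate n ' ') = n - 1 := by
    rw [riLoop_char, if_neg (by simp [List.replicate_eq_nil_iff]; omega), if_pos hall]
    simp
  constructor
  · rw [hA, hri, slice_from_length _ _ (by omega), List.length_replicate]
    omega
  · rw [hB, htw, slice_from_length _ _ (by omega), List.length_replicate]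
    omega

theorem last_split (p : List Char → Bool) : ∀ (v : List (List Char)), (∃ x ∈ v, p x = false) →
    ∃ s1 g s2, v = s1 ++ g :: s2 ∧ p g = false ∧ ∀ y ∈ s2, p y = true := by
  intro v
  induction v with
  | nil => rintro ⟨x, hx, -⟩; cases hx
  | cons a v' ih =>
    rintro ⟨x, hx, hpx⟩
    by_cases h' : ∃ y ∈ v', p y = false
    · obtain ⟨s1, g, s2, heq, hg, hs2⟩ := ih h'
      exact ⟨a :: s1, g, s2, by rw [heq]; rfl, hg, hs2⟩
    · rw [not_exists] at h'
      simp only [not_and] at h'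
      have hxa : x = a := by
        rcases List.mem_cons.mp hx with rfl | hx'
        · rfl
        · exact absurd hpx (h' x hx')
      refine ⟨[], a, v', rfl, hxa ▸ hpx, fun y hy => ?_⟩
      cases hp : p y
      · exact absurd hp (h' y hy)
      · rfl

theorem nonws_survives (k : Int) (hk : 1 ≤ k) (g : List Char) (c : Char) (hc : c ∈ g)
    (hw : ¬PySem.Chars.isspace c = true) : c ∈ remove_indent k g := by
  have hA : remove_indent k g
      = PySem.List.slice g (some (min ((riLoop 0 0 g : Nat) : Int) k)) none := rfl
  rw [hA, PySem.List.slice_from g (by omega)]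
  set m := (min ((riLoop 0 0 g : Nat) : Int) k).toNat with hm
  have hmle : m ≤ (g.takeWhile (· == ' ')).length := by
    have := riLoop_le g
    omega
  have hcd : c ∈ g.dropWhile (· == ' ') := by
    rw [← List.takeWhile_append_dropWhile (p := (· == ' ')) (l := g)] at hc
    rcases List.mem_append.mp hc with h1 | h1
    · have := List.mem_takeWhile_imp h1
      have hsp : c = ' ' := by simpa using this
      subst hsp
      exact absurd (by decide) hw
    · exact h1
  rw [dropWhile_eq_drop] at hcd
  have hsub : g.drop (g.takeWhile (· == ' ')).length = (g.drop m).drop ((g.takeWhile (· == ' ')).length - m) := by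
    rw [List.drop_drop]
    congr 1
    omega
  rw [hsub] at hcd
  exact (List.drop_sublist _ _).subset hcd

theorem blank_map (k : Int) {l : List Char} (h : ∀ c ∈ l, PySem.Chars.isspace c = true) :
    (∀ c ∈ remove_indent k l, PySem.Chars.isspace c = true) ∧
      (∀ c ∈ cutSpec k l, PySem.Chars.isspace c = true) := by
  constructor <;> intro c hc
  · exact h c (by unfold remove_indent at hc; exact slice_subset c hc)
  · exact h c (by unfold cutSpec at hc; exact slice_subset c hc)

theorem cutSpec_zero (l : List Char) : cutSpec 0 l = l := by
  unfold cutSpec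
  have ht : (0:Int) ≤ PySem.Chars.len l - PySem.Chars.len (l.dropWhile (· == ' ')) := by
    rw [PySem.Chars.len_eq, PySem.Chars.len_eq, len_sub_dropWhile]
    positivity
  rw [min_eq_left ht, PySem.List.slice_from l (le_refl 0)]
  simp

-- ===== VERDICT (by name: the statement is the Claim_ definition above) =====
theorem strip_lines_to_first_spec : Claim_unchanged_strip_lines_to_first := by
  intro text _hdom hD
  show strip_lines_to_first text = strip_lines_to_first_alt text
  rw [altForm]
  by_cases ht : text = ""
  · subst ht; decide
  · simp only [strip_lines_to_first, altSpec, if_neg ht]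
    rw [fnb_alt]
    by_cases hall : altBlanks (PySem.Chars.splitOn text.toList ['\n']) = (PySem.Chars.splitOn text.toList ['\n']).length
    · rw [if_pos hall, if_pos hall]
    · rw [if_neg hall, if_neg hall]
      set L := PySem.Chars.splitOn text.toList ['\n'] with hL
      have hjlt : altBlanks L < L.length := (altBlanks_le L).lt_of_ne hall
      obtain ⟨f, r, hfr, hfne⟩ := altBlanks_head L hjlt
      simp only [Nat.zero_add, PySem.List.slice_from_natCast, hfr, List.headD_cons]
      set k : Int := PySem.Chars.len f - PySem.Chars.len (PySem.Chars.lstrip f) with hk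
      have hk0 : k = ((f.takeWhile PySem.Chars.isspace).length : Int) := by
        rw [hk]
        simp only [PySem.Chars.lstrip, PySem.Chars.len_eq]
        exact len_sub_dropWhile _ _
      by_cases hkz : k = 0
      · rw [if_neg (by simp [hkz])]
        rw [hkz, show cutSpec 0 = id from funext cutSpec_zero, List.map_id]
      · have hk1 : 1 ≤ k := by rw [hk0] at hkz ⊢; omega
        have hR : (PySem.Chars.splitOn text.toList ['\n']).dropWhile
            (·.all PySem.Chars.isspace) = f :: r := by
          rw [show (PySem.Chars.splitOn text.toList ['\n']) = L from hL.symm,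
            dropWhile_blank_eq, hfr]
        have hbadk : dBad k.toNat r = false := by
          cases hb : dBad k.toNat r
          · rfl
          · exact absurd (by
              unfold D_strip_lines_to_first
              rw [hR]
              simp only [List.tail_cons, List.headD_cons]
              obtain ⟨j, hj, n, hn, hn0, hget, hafter⟩ := (dBad_iff k.toNat r).mp hb
              exact ⟨j, hj, n, by rw [hk0] at hn; simpa using hn, hn0, hget,
                by rw [List.tail_drop]; exact hafter⟩) hD
        have hfnot : ¬(f ≠ [] ∧ f.all (· == ' ') = true ∧ f.length ≤ k.toNat) := by
          rintro ⟨-, hsp, -⟩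
          exact hfne ((strip_eq_nil_iff f).mpr (allspace_ws hsp))
        rw [if_pos hkz]
        refine congrArg String.ofList (wsrel_join ?_)
        rw [List.map_cons, List.map_cons, line_eq k hk1 f hfnot]
        exact WsRel.cons _ _ _ (map_rel k hk1 r hbadk)

theorem strip_lines_to_first_tight : Claim_exact_strip_lines_to_first := by
  intro text _hdom hD
  rw [altForm]
  by_cases ht : text = ""
  · subst ht; exact absurd hD (by decide)
  · simp only [D_strip_lines_to_first] at hD
    rw [dropWhile_blank_eq] at hD
    set L := PySem.Chars.splitOn text.toList ['\n'] with hL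
    have hjlt' : altBlanks L < L.length := by
      rcases Nat.lt_or_ge (altBlanks L) L.length with h1 | h1
      · exact h1
      · rw [List.drop_eq_nil_of_le h1] at hD
        obtain ⟨j, hj, -⟩ := hD
        simp at hj
    obtain ⟨f, r, hfr, hfne⟩ := altBlanks_head L hjlt'
    rw [hfr] at hD
    simp only [List.tail_cons, List.headD_cons] at hD
    obtain ⟨j, hj, n, hn, hn0, hget, hafter⟩ := hD
    rw [List.tail_drop] at hafter
    have hall : ¬altBlanks L = L.length := Nat.ne_of_lt hjlt'
    have hk1 : (1:Int) ≤ PySem.Chars.len f - PySem.Chars.len (PySem.Chars.lstrip f) := by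
      rw [show PySem.Chars.len f - PySem.Chars.len (PySem.Chars.lstrip f)
          = ((f.takeWhile PySem.Chars.isspace).length : Int) from by
        simp only [PySem.Chars.lstrip, PySem.Chars.len_eq]
        exact len_sub_dropWhile _ _]
      omega
    set k : Int := PySem.Chars.len f - PySem.Chars.len (PySem.Chars.lstrip f) with hk
    have hkz : k ≠ 0 := by omega
    have hnk : n ≤ k.toNat := by
      rw [hk, show PySem.Chars.len f - PySem.Chars.len (PySem.Chars.lstrip f)
          = ((f.takeWhile PySem.Chars.isspace).length : Int) from by
        simp only [PySem.Chars.lstrip, PySem.Chars.len_eq]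
        exact len_sub_dropWhile _ _]
      omega
    have hAeq : strip_lines_to_first text
        = String.ofList (PySem.Chars.rstrip (PySem.Chars.join ['\n']
            ((f :: r).map (remove_indent k)))) := by
      simp only [strip_lines_to_first, if_neg ht]
      rw [← hL, fnb_alt, if_neg hall]
      simp only [Nat.zero_add, PySem.List.slice_from_natCast, hfr, List.headD_cons]
      rw [← hk, if_pos hkz]
    have hBeq : altSpec text
        = String.ofList (PySem.Chars.rstrip (PySem.Chars.join ['\n']
            ((f :: r).map (cutSpec k)))) := by
      simp only [altSpec]
      rw [← hL, if_neg hall, hfr]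
      simp only [List.headD_cons]
      rw [← hk]
    -- decompose r around the bad line and the last non-blank line after it
    have hjr : j < r.length := hj
    obtain ⟨hlt2, hgetj⟩ := List.getElem?_eq_some_iff.mp hget
    have hr_split : r = r.take j ++ List.replicate n ' ' :: r.drop (j + 1) := by
      conv_lhs => rw [← List.take_append_drop j r]
      rw [List.drop_eq_getElem_cons hjr, hgetj]
    obtain ⟨x, hx, hxb⟩ := List.all_eq_false.mp hafter
    obtain ⟨s1, g, s2, hsplit, hg, hs2⟩ :=
      last_split (·.all PySem.Chars.isspace) (r.drop (j + 1)) ⟨x, hx, Bool.eq_false_iff.mpr hxb⟩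
    have hX : f :: r = ((f :: (r.take j ++ List.replicate n ' ' :: s1)) ++ [g]) ++ s2 := by
      conv_lhs => rw [hr_split, hsplit]
      simp [List.append_assoc]
    set P : List (List Char) := f :: (r.take j ++ List.replicate n ' ' :: s1) with hP
    -- the surviving non-ws character of g
    obtain ⟨c, hcg, hcw⟩ := List.all_eq_false.mp hg
    have hgA : PySem.Chars.rstrip (remove_indent k g) ≠ [] := by
      intro hnil
      exact hcw ((rstrip_eq_nil_iff _).mp hnil c (nonws_survives k hk1 g c hcg hcw))
    have hgeq : remove_indent k g = cutSpec k g := by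
      apply line_eq k hk1
      rintro ⟨-, hsp, -⟩
      exact hcw (List.all_eq_true.mp (by
        exact List.all_eq_true.mpr (allspace_ws hsp)) c hcg)
    have hs2A : ∀ l ∈ s2.map (remove_indent k), ∀ c' ∈ l, PySem.Chars.isspace c' = true := by
      intro l hl c' hc'
      rw [List.mem_map] at hl
      obtain ⟨y, hy, rfl⟩ := hl
      exact (blank_map k (List.all_eq_true.mp (hs2 y hy))).1 c' hc'
    have hs2B : ∀ l ∈ s2.map (cutSpec k), ∀ c' ∈ l, PySem.Chars.isspace c' = true := by
      intro l hl c' hc'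
      rw [List.mem_map] at hl
      obtain ⟨y, hy, rfl⟩ := hl
      exact (blank_map k (List.all_eq_true.mp (hs2 y hy))).2 c' hc'
    have hA2 : PySem.Chars.rstrip (PySem.Chars.join ['\n'] ((f :: r).map (remove_indent k)))
        = PySem.Chars.join ['\n'] (P.map (remove_indent k)) ++ ['\n']
            ++ PySem.Chars.rstrip (remove_indent k g) := by
      rw [hX, List.map_append, wsrel_join (wsrel_append_blank _ _ hs2A)]
      simp only [List.map_append, List.map_cons, List.map_nil]
      rw [rstrip_join_concat _ hgA (P.map (remove_indent k)),
        if_neg (by simp [hP] : ¬P.map (remove_indent k) = [])]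
    have hB2 : PySem.Chars.rstrip (PySem.Chars.join ['\n'] ((f :: r).map (cutSpec k)))
        = PySem.Chars.join ['\n'] (P.map (cutSpec k)) ++ ['\n']
            ++ PySem.Chars.rstrip (remove_indent k g) := by
      rw [hX, List.map_append, wsrel_join (wsrel_append_blank _ _ hs2B)]
      simp only [List.map_append, List.map_cons, List.map_nil]
      rw [hgeq, rstrip_join_concat _ (hgeq ▸ hgA) (P.map (cutSpec k)),
        if_neg (by simp [hP] : ¬P.map (cutSpec k) = [])]
    rw [hAeq, hBeq, hA2, hB2]
    intro heq
    have hlists := congrArg String.toList heq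
    simp only [String.toList_ofList] at hlists
    have hlens := congrArg List.length hlists
    simp only [List.length_append] at hlens
    have hjoins : (PySem.Chars.join ['\n'] (P.map (remove_indent k))).length
        = (PySem.Chars.join ['\n'] (P.map (cutSpec k))).length := by omega
    rw [join_length _ (by simp [hP]), join_length _ (by simp [hP])] at hjoins
    simp only [List.map_map, List.length_map] at hjoins
    have hsum : (P.map (List.length ∘ cutSpec k)).sum < (P.map (List.length ∘ remove_indent k)).sum := by
      obtain ⟨h1, h0⟩ := bad_line_lengths k hk1 n hn0 hnk
      have hmono1 : ((r.take j).map (List.length ∘ cutSpec k)).sum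
          ≤ ((r.take j).map (List.length ∘ remove_indent k)).sum :=
        List.sum_le_sum (fun i _ => line_len_le k hk1 i)
      have hmono2 : (s1.map (List.length ∘ cutSpec k)).sum
          ≤ (s1.map (List.length ∘ remove_indent k)).sum :=
        List.sum_le_sum (fun i _ => line_len_le k hk1 i)
      have hmonof : (cutSpec k f).length ≤ (remove_indent k f).length := line_len_le k hk1 f
      simp only [hP, List.map_cons, List.map_append, List.sum_cons, List.sum_append,
        Function.comp_apply]
      rw [h1, h0]
      omega
    have hPnonempty : P.length ≥ 1 := by simp [hP]
    omega

theorem strip_lines_to_first_changed : Claim_changed_strip_lines_to_first := by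
  unfold Claim_changed_strip_lines_to_first
  refine ⟨by decide, ?_, by decide, by decide, by decide⟩
  show D_strip_lines_to_first " a\n \nb"
  unfold D_strip_lines_to_first
  exact ⟨0, by decide, 1, by decide, by decide, by decide, by decide⟩
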